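-- pv_equiv track=rewrite | github.com/lzhyu/GridWorld | gridworld/utils/env_utils/ninerooms_util.py | model2index
-- ===== SOURCE A (Python) =====
-- def model2index(Model: dict):
--     gate_list = [(k, v) for k, v in Model.items()]
--     gate_list.sort(key=lambda ele: ele[0])
--     type_list = [0 if v=='coin' else 1 if v=='water' else 2 for (_, v) in gate_list]
--     index = 0
--     for order, _type in enumerate(type_list):
--         index += _type * (3 ** order)
--     return index
-- ===== SOURCE B (Python) =====
-- def model2index(Model: dict):
--     index = 0
--     for k, v in Model.items():
--         rank = sum(1 for j in Model if j < k)
--         index += (0 if v == 'coin' else 1 if v == 'water' else 2) * 3 ** rank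
--     return index
-- ===== Notes on version B (the rewrite author's own statement) =====
-- stated objective: alternative
-- what changed: B never sorts: for each entry it computes the position of its key directly as its rank (the number of smaller keys, found by a counting scan) and adds digit*3**rank, replacing A's sort + intermediate pair/digit lists + enumerate loop.
import Mathlib
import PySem

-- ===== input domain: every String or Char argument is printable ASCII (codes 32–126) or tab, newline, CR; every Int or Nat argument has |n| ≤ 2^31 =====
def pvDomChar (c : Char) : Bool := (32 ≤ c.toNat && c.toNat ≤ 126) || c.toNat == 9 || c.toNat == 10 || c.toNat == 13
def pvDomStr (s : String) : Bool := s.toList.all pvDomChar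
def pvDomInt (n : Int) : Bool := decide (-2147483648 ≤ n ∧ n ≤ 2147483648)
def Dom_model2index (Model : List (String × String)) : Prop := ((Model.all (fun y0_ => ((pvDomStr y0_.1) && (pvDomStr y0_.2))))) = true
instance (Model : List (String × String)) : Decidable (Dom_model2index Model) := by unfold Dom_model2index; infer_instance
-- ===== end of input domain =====

-- B drops the sort entirely: each entry's base-3 position is computed as the count of smaller keys (rank), a genuinely different (quadratic, sort-free) algorithm with the same exact result.


-- ===== PORT A =====
def model2index (Model : List (String × String)) : Int :=
  let gate_list := PySem.List.sorted Model (fun ele => ele.1) false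
  let type_list := gate_list.map (fun p => if p.2 = "coin" then (0 : Int) else if p.2 = "water" then 1 else 2)
  (PySem.List.enumerate type_list 0).foldl (fun index p => index + p.2 * 3 ^ p.1.toNat) 0

-- ===== PORT B =====
def model2index_alt (Model : List (String × String)) : Int :=
  (PySem.Dict.mk Model).items.foldl
    (fun index p =>
      -- rank = sum(1 for j in Model if j < k)
      let rank := (PySem.Dict.mk Model).keys.foldl (fun c j => if j < p.1 then c + 1 else c) (0 : Nat)
      index + (if p.2 = "coin" then (0 : Int) else if p.2 = "water" then 1 else 2) * 3 ^ rank) 0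

-- ===== PRECONDITION & SPEC =====
-- Pre_ admits exactly the association lists with pairwise distinct keys: those are the faithful
-- representations of the Python dict argument (a dict cannot hold duplicate keys).
def Pre_model2index (Model : List (String × String)) : Prop := (Model.map (·.1)).Nodup
instance (Model : List (String × String)) : Decidable (Pre_model2index Model) := by unfold Pre_model2index; infer_instance
def pvWitness_model2index : (List (String × String)) := [("b", "coin"), ("a", "water"), ("c", "gate")]
def Spec_model2index (Model : List (String × String)) (out : Int) : Prop := out = model2index_alt Model
instance (Model : List (String × String)) (out : Int) : Decidable (Spec_model2index Model out) := by unfold Spec_model2index; infer_instance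

-- ===== CLAIM (what is proved, stated in full; the proofs are below) =====
def Claim_equal_model2index : Prop := ∀ (Model : List (String × String)), Dom_model2index Model → Pre_model2index Model → Spec_model2index Model (model2index Model)

-- ===== LEMMAS AND PROOFS =====

/-- The base-3 digit of a value. -/
def pvDigit (p : String × String) : Int :=
  if p.2 = "coin" then 0 else if p.2 = "water" then 1 else 2

/-- Positional value of a digit list starting at power `n`. -/
def pvPos (ds : List Int) (n : Nat) : Int :=
  match ds with
  | [] => 0
  | d :: tl => d * 3 ^ n + pvPos tl (n + 1)

theorem pvPos_shift (ds : List Int) (n : Nat) :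
    pvPos ds (n + 1) = 3 * pvPos ds n := by
  induction ds generalizing n with
  | nil => simp [pvPos]
  | cons d tl ih =>
      simp only [pvPos, ih, pow_succ]
      ring

/-- B's inner counting loop is `countP`. -/
theorem pvCount_foldl (l : List String) (k : String) (c : Nat) :
    l.foldl (fun c j => if j < k then c + 1 else c) c
      = c + l.countP (fun j => decide (j < k)) := by
  induction l generalizing c with
  | nil => simp
  | cons j tl ih =>
      rw [List.foldl_cons]
      by_cases h : j < k
      · have hd : decide (j < k) = true := decide_eq_true h
        rw [if_pos h, ih, List.countP_cons, hd]
        simp; omega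
      · have hd : decide (j < k) = false := decide_eq_false h
        rw [if_neg h, ih, List.countP_cons, hd]
        simp

/-- A's enumerate-fold computes the positional sum. -/
theorem pvEnum_foldl (ds : List Int) (s : Nat) (a : Int) :
    (PySem.List.enumerate ds (s : Int)).foldl (fun index p => index + p.2 * 3 ^ p.1.toNat) a
      = a + pvPos ds s := by
  induction ds generalizing s a with
  | nil => simp [PySem.List.enumerate_nil, pvPos]
  | cons d tl ih =>
      rw [PySem.List.enumerate_cons]
      have hcast : (s : Int) + 1 = ((s + 1 : Nat) : Int) := by push_cast; ring
      simp only [List.foldl_cons, hcast, ih, pvPos, Int.toNat_natCast]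
      ring

/-- Rank-sum over a key-strictly-increasing list equals the positional sum. -/
theorem pvRank_sum (L : List (String × String))
    (h : (L.map (·.1)).Pairwise (· < ·)) :
    (L.map (fun p => pvDigit p * 3 ^ ((L.map (·.1)).countP (fun j => decide (j < p.1))))).sum
      = pvPos (L.map pvDigit) 0 := by
  induction L with
  | nil => simp [pvPos]
  | cons p tl ih =>
      simp only [List.map_cons, List.pairwise_cons] at h
      obtain ⟨hp, htl⟩ := h
      -- head rank is 0
      have h0 : ((p.1 :: tl.map (·.1)).countP (fun j => decide (j < p.1))) = 0 := by
        rw [List.countP_eq_zero]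
        intro j hj
        simp only [List.mem_cons] at hj
        rcases hj with rfl | hj
        · simp
        · simpa using not_lt_of_gt (hp j hj)
      -- tail ranks shift by 1
      have hshift : ∀ q ∈ tl, ((p.1 :: tl.map (·.1)).countP (fun j => decide (j < q.1)))
          = (tl.map (·.1)).countP (fun j => decide (j < q.1)) + 1 := by
        intro q hq
        rw [List.countP_cons]
        simp [hp q.1 (List.mem_map_of_mem hq)]
      have hmap : (tl.map (fun q => pvDigit q * 3 ^ ((p.1 :: tl.map (·.1)).countP (fun j => decide (j < q.1)))))
          = tl.map (fun q => 3 * (pvDigit q * 3 ^ ((tl.map (·.1)).countP (fun j => decide (j < q.1))))) := by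
        apply List.map_congr_left
        intro q hq
        rw [hshift q hq, pow_succ]
        ring
      simp only [List.map_cons, List.sum_cons, h0, pow_zero, mul_one, hmap, pvPos]
      rw [List.sum_map_mul_left, ih htl, pvPos_shift]

theorem model2index_spec_aux (Model : List (String × String))
    (hpre : Pre_model2index Model) :
    model2index Model = model2index_alt Model := by
  classical
  set L := PySem.List.sorted Model (fun ele => ele.1) false with hL
  have hperm : L.Perm Model := PySem.List.sorted_perm ..
  have hkeysperm : (L.map (·.1)).Perm (Model.map (·.1)) := hperm.map _
  have hnodup : (L.map (·.1)).Nodup := hkeysperm.nodup_iff.mpr hpre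
  have hle : (L.map (·.1)).Pairwise (· ≤ ·) := PySem.List.sorted_map_key_pairwise ..
  have hlt : (L.map (·.1)).Pairwise (· < ·) :=
    (hle.and hnodup).imp (fun h => lt_of_le_of_ne h.1 h.2)
  -- B as a sum of rank-weighted digits over Model
  have hB : model2index_alt Model
      = (Model.map (fun p => pvDigit p * 3 ^ ((Model.map (·.1)).countP (fun j => decide (j < p.1))))).sum := by
    unfold model2index_alt
    simp only [PySem.Dict.keys]
    rw [PySem.List.foldl_congr_mem Model _
      (fun (index : Int) (p : String × String) =>
        index + pvDigit p * 3 ^ ((Model.map (·.1)).countP (fun j => decide (j < p.1)))) 0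
      (by intro acc p _
          simp only [pvCount_foldl, Nat.zero_add, pvDigit])]
    rw [PySem.List.foldl_add]
    simp
  -- counts over Model's keys equal counts over L's keys (permutation)
  have hcnt : ∀ k : String, (Model.map (·.1)).countP (fun j => decide (j < k))
      = (L.map (·.1)).countP (fun j => decide (j < k)) := by
    intro k; exact (hkeysperm.countP_eq _).symm
  have hBsum : model2index_alt Model
      = (L.map (fun p => pvDigit p * 3 ^ ((L.map (·.1)).countP (fun j => decide (j < p.1))))).sum := by
    rw [hB]
    refine ((hperm.map _).sum_eq).symm.trans ?_
    congr 1
    apply List.map_congr_left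
    intro p _
    rw [hcnt]
  -- A as the positional sum over the sorted list
  have hA : model2index Model = pvPos (L.map pvDigit) 0 := by
    unfold model2index
    rw [← hL]
    have := pvEnum_foldl (L.map pvDigit) 0 0
    simpa [pvDigit] using this
  rw [hA, hBsum, pvRank_sum L hlt]

-- ===== VERDICT (by name: the statement is the Claim_ definition above) =====
theorem model2index_spec : Claim_equal_model2index := by
  intro Model _ hpre
  exact model2index_spec_aux Model hpre
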